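-- pv_equiv track=rewrite | github.com/dgtlmoon/changedetection.io | changedetectionio/diff/tokenizers/words_and_html.py | tokenize_words_and_html
-- ===== SOURCE A (Python) =====
-- from typing import List
--
-- def tokenize_words_and_html(text: str) -> List[str]:
--     """
--     Split text into words and boundaries (spaces, HTML tags).
--
--     This tokenizer preserves HTML tags as atomic units while splitting on whitespace.
--     Useful for content that contains HTML markup.
--
--     Args:
--         text: Input text to tokenize
--
--     Returns:
--         List of tokens (words, spaces, HTML tags)
--
--     Examples:
--         >>> tokenize_words_and_html("<p>Hello world</p>")
--         ['<p>', 'Hello', ' ', 'world', '</p>']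
--         >>> tokenize_words_and_html("<a href='test.com'>link</a>")
--         ['<a href=\\'test.com\\'>', 'link', '</a>']
--     """
--     tokens = []
--     current = ''
--     in_tag = False
--
--     for char in text:
--         if char == '<':
--             # Start of HTML tag
--             if current:
--                 tokens.append(current)
--                 current = ''
--             current = '<'
--             in_tag = True
--         elif char == '>' and in_tag:
--             # End of HTML tag
--             current += '>'
--             tokens.append(current)
--             current = ''
--             in_tag = False
--         elif char.isspace() and not in_tag:
--             # Space outside of tag
--             if current:
--                 tokens.append(current)
--                 current = ''
--             tokens.append(char)
--         else:
--             current += char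
--
--     if current:
--         tokens.append(current)
--     return tokens
-- ===== SOURCE B (Python) =====
-- from typing import List
--
-- def tokenize_words_and_html(text: str) -> List[str]:
--     """Index-based lookahead scanner: slices tags, single whitespace chars, and
--     maximal word runs directly from the input, with no accumulator/flag state."""
--     tokens = []
--     n = len(text)
--     i = 0
--     while i < n:
--         c = text[i]
--         if c == '<':
--             j = i + 1
--             while j < n and text[j] != '>' and text[j] != '<':
--                 j += 1
--             if j < n and text[j] == '>':
--                 j += 1  # include the closing '>'
--             tokens.append(text[i:j])
--             i = j
--         elif c.isspace():
--             tokens.append(c)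
--             i += 1
--         else:
--             j = i + 1
--             while j < n and not text[j].isspace() and text[j] != '<':
--                 j += 1
--             tokens.append(text[i:j])
--             i = j
--     return tokens
-- ===== Notes on version B (the rewrite author's own statement) =====
-- stated objective: alternative
-- what changed: Replaced A's character-by-character loop with accumulator string and in_tag flag state by a stateless index-based lookahead scanner that slices each whole tag, single whitespace char, or maximal word run directly from the input.
import Mathlib
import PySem

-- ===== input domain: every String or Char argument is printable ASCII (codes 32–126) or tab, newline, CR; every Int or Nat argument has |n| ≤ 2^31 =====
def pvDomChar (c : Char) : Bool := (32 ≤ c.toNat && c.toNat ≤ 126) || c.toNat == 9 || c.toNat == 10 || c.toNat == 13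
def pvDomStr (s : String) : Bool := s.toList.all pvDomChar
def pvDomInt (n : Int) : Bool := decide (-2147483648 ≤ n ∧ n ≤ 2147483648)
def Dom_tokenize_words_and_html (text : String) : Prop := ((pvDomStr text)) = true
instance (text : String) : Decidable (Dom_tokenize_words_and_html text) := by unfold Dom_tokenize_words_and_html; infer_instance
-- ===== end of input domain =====

-- B rewrites A's accumulator/flag character-by-character loop as a stateless lookahead
-- scanner that slices whole tags and whole word runs at once (objective: alternative).

-- ===== PORT A =====
-- loop state: (tokens so far, current, in_tag); 'current' kept as List Char
def pvStepA (st : List (List Char) × List Char × Bool) (c : Char) :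
    List (List Char) × List Char × Bool :=
  if c = '<' then
    ((if st.2.1.isEmpty then st.1 else st.1 ++ [st.2.1]), ['<'], true)
  else if c = '>' ∧ st.2.2 = true then
    (st.1 ++ [st.2.1 ++ ['>']], [], false)
  else if PySem.Chars.isspace c = true ∧ st.2.2 = false then
    ((if st.2.1.isEmpty then st.1 else st.1 ++ [st.2.1]) ++ [[c]], [], false)
  else
    (st.1, st.2.1 ++ [c], st.2.2)

-- the trailing "if current: tokens.append(current)"
def pvFinishA (st : List (List Char) × List Char × Bool) : List (List Char) :=
  if st.2.1.isEmpty then st.1 else st.1 ++ [st.2.1]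

def tokenize_words_and_html (text : String) : List String :=
  (pvFinishA (text.toList.foldl pvStepA ([], [], false))).map String.mk

-- ===== PORT B =====
-- scan from the char after '<': stop after the first '>' (included) or before an
-- intervening '<' or at end; acc holds the tag chars seen so far, reversed
def pvTagSplit (cs : List Char) (acc : List Char) : List Char × List Char :=
  match cs with
  | [] => (acc.reverse, [])
  | c :: r =>
    if c = '>' then ((c :: acc).reverse, r)
    else if c = '<' then (acc.reverse, c :: r)
    else pvTagSplit r (c :: acc)

def pvWordChar (c : Char) : Bool := !(PySem.Chars.isspace c) && !(c = '<')

theorem pvTagSplit_len (cs acc : List Char) : (pvTagSplit cs acc).2.length ≤ cs.length := by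
  induction cs generalizing acc with
  | nil => simp [pvTagSplit]
  | cons c r ih =>
    simp only [pvTagSplit]
    split_ifs
    · simp
    · simp
    · exact Nat.le_succ_of_le (ih _)

def pvScan : List Char → List (List Char)
  | [] => []
  | c :: r =>
    if c = '<' then
      (pvTagSplit r [c]).1 :: pvScan (pvTagSplit r [c]).2
    else if PySem.Chars.isspace c then
      [c] :: pvScan r
    else
      (c :: r.takeWhile pvWordChar) :: pvScan (r.dropWhile pvWordChar)
termination_by cs => cs.length
decreasing_by
  · exact Nat.lt_succ_of_le (pvTagSplit_len r [c])
  · exact Nat.lt_succ_self _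
  · exact Nat.lt_succ_of_le (List.length_dropWhile_le _ _)

def tokenize_words_and_html_alt (text : String) : List String :=
  (pvScan text.toList).map String.mk

-- ===== PRECONDITION & SPEC =====
def Spec_tokenize_words_and_html (text : String) (out : List String) : Prop := out = tokenize_words_and_html_alt text
instance (text : String) (out : List String) : Decidable (Spec_tokenize_words_and_html text out) := by unfold Spec_tokenize_words_and_html; infer_instance

-- ===== CLAIM (what is proved, stated in full; the proofs are below) =====
def Claim_equal_tokenize_words_and_html : Prop := ∀ (text : String), Dom_tokenize_words_and_html text → Spec_tokenize_words_and_html text (tokenize_words_and_html text)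

-- ===== LEMMAS AND PROOFS =====

theorem pvScan_nil : pvScan [] = [] := by rw [pvScan]

theorem pvScan_tag (r : List Char) :
    pvScan ('<' :: r) = (pvTagSplit r ['<']).1 :: pvScan (pvTagSplit r ['<']).2 := by
  rw [pvScan]; simp

theorem pvScan_space {c : Char} (h1 : c ≠ '<') (h2 : PySem.Chars.isspace c = true)
    (r : List Char) : pvScan (c :: r) = [c] :: pvScan r := by
  rw [pvScan]; simp [h1, h2]

theorem pvScan_word {c : Char} (h1 : c ≠ '<') (h2 : PySem.Chars.isspace c = false)
    (r : List Char) :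
    pvScan (c :: r) = (c :: r.takeWhile pvWordChar) :: pvScan (r.dropWhile pvWordChar) := by
  rw [pvScan]; simp [h1, h2]

theorem pv_wordChar_not_lt {c : Char} (h : pvWordChar c = true) : c ≠ '<' := by
  simp [pvWordChar] at h; exact h.2

theorem pv_wordChar_not_sp {c : Char} (h : pvWordChar c = true) : PySem.Chars.isspace c = false := by
  simp [pvWordChar] at h; exact h.1

theorem pvTagSplit_lt (r acc : List Char) : pvTagSplit ('<' :: r) acc = (acc.reverse, '<' :: r) := by
  simp [pvTagSplit]

theorem pvTagSplit_gt (r acc : List Char) : pvTagSplit ('>' :: r) acc = (('>' :: acc).reverse, r) := by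
  simp [pvTagSplit]

theorem pvTagSplit_other {c : Char} (h1 : c ≠ '>') (h2 : c ≠ '<') (r acc : List Char) :
    pvTagSplit (c :: r) acc = pvTagSplit r (c :: acc) := by
  simp [pvTagSplit, h1, h2]

theorem pv_takeWhile_append {p : Char → Bool} : ∀ {xs : List Char} (ys : List Char),
    (∀ c ∈ xs, p c = true) → (xs ++ ys).takeWhile p = xs ++ ys.takeWhile p
  | [], ys, _ => rfl
  | x :: r, ys, h => by
    rw [List.cons_append, List.takeWhile_cons_of_pos (h x (List.mem_cons_self ..)),
      pv_takeWhile_append ys (fun c hc => h c (List.mem_cons_of_mem _ hc)), List.cons_append]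

theorem pv_dropWhile_append {p : Char → Bool} : ∀ {xs : List Char} (ys : List Char),
    (∀ c ∈ xs, p c = true) → (xs ++ ys).dropWhile p = ys.dropWhile p
  | [], ys, _ => rfl
  | x :: r, ys, h => by
    rw [List.cons_append, List.dropWhile_cons_of_pos (h x (List.mem_cons_self ..)),
      pv_dropWhile_append ys (fun c hc => h c (List.mem_cons_of_mem _ hc))]

-- a maximal nonempty word run followed by a non-word boundary is one token
theorem pvScan_word_prefix (w r : List Char) (hw : w ≠ [])
    (hall : ∀ c ∈ w, pvWordChar c = true)
    (hr : r.takeWhile pvWordChar = []) : pvScan (w ++ r) = w :: pvScan r := by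
  rcases w with _ | ⟨d, ds⟩
  · exact absurd rfl hw
  · have hd : pvWordChar d = true := hall d (List.mem_cons_self ..)
    have htail : ∀ c ∈ ds, pvWordChar c = true := fun c hc => hall c (List.mem_cons_of_mem _ hc)
    rw [List.cons_append, pvScan_word (pv_wordChar_not_lt hd) (pv_wordChar_not_sp hd),
      pv_takeWhile_append r htail, pv_dropWhile_append r htail, hr, List.append_nil]
    have : r.dropWhile pvWordChar = r := by
      conv_rhs => rw [← List.takeWhile_append_dropWhile (p := pvWordChar) (l := r)]
      rw [hr, List.nil_append]
    rw [this]

theorem pv_flush (toks : List (List Char)) {cur : List Char} (h : cur ≠ []) :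
    (if cur.isEmpty then toks else toks ++ [cur]) = toks ++ [cur] := by
  cases cur with
  | nil => exact absurd rfl h
  | cons d ds => rfl

theorem pvStepA_lt (toks : List (List Char)) (cur : List Char) (b : Bool) :
    pvStepA (toks, cur, b) '<' = ((if cur.isEmpty then toks else toks ++ [cur]), ['<'], true) := by
  simp [pvStepA]

theorem pvStepA_gt_tag (toks : List (List Char)) (cur : List Char) :
    pvStepA (toks, cur, true) '>' = (toks ++ [cur ++ ['>']], [], false) := by
  simp [pvStepA]

theorem pvStepA_other_tag (toks : List (List Char)) (cur : List Char) {c : Char}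
    (h1 : c ≠ '<') (h2 : c ≠ '>') : pvStepA (toks, cur, true) c = (toks, cur ++ [c], true) := by
  simp [pvStepA, h1, h2]

theorem pvStepA_space (toks : List (List Char)) (cur : List Char) {c : Char}
    (h1 : c ≠ '<') (h2 : PySem.Chars.isspace c = true) :
    pvStepA (toks, cur, false) c =
      ((if cur.isEmpty then toks else toks ++ [cur]) ++ [[c]], [], false) := by
  simp [pvStepA, h1, h2]

theorem pvStepA_word (toks : List (List Char)) (cur : List Char) {c : Char}
    (h1 : c ≠ '<') (h2 : PySem.Chars.isspace c = false) :
    pvStepA (toks, cur, false) c = (toks, cur ++ [c], false) := by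
  simp [pvStepA, h1, h2]

-- joint loop invariant, by strong induction on the remaining input length:
-- tag mode with nonempty 'cur' behaves like pvTagSplit from cur.reverse;
-- word mode with all-word-char 'cur' behaves like pvScan on cur ++ rest.
theorem pv_main (n : ℕ) :
    (∀ cs : List Char, cs.length ≤ n → ∀ toks cur, cur ≠ [] →
      pvFinishA (cs.foldl pvStepA (toks, cur, true)) =
        toks ++ (pvTagSplit cs cur.reverse).1 :: pvScan (pvTagSplit cs cur.reverse).2) ∧
    (∀ cs : List Char, cs.length ≤ n → ∀ toks cur, (∀ c ∈ cur, pvWordChar c = true) →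
      pvFinishA (cs.foldl pvStepA (toks, cur, false)) = toks ++ pvScan (cur ++ cs)) := by
  induction n with
  | zero =>
    constructor
    · rintro (_ | ⟨c, r⟩) hlen toks cur hcur
      · simp [pvTagSplit, pvFinishA, pvScan_nil, hcur]
      · exact absurd hlen (by simp)
    · rintro (_ | ⟨c, r⟩) hlen toks cur hcur
      · rcases eq_or_ne cur [] with h | h
        · simp [h, pvFinishA, pvScan_nil]
        · have hpfx := pvScan_word_prefix cur [] h hcur rfl
          rw [List.append_nil] at hpfx
          simp [pvFinishA, hpfx, pvScan_nil, h]
      · exact absurd hlen (by simp)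
  | succ n ih =>
    constructor
    · -- tag mode
      rintro (_ | ⟨c, r⟩) hlen toks cur hcur
      · simp [pvTagSplit, pvFinishA, pvScan_nil, hcur]
      · simp only [List.length_cons, Nat.succ_le_succ_iff] at hlen
        by_cases hc : c = '<'
        · subst hc
          rw [pvTagSplit_lt, List.reverse_reverse, pvScan_tag]
          simp only [List.foldl_cons, pvStepA_lt, pv_flush toks hcur]
          rw [ih.1 r hlen _ ['<'] (by simp)]
          simp
        · by_cases hg : c = '>'
          · subst hg
            rw [pvTagSplit_gt]
            simp only [List.foldl_cons, pvStepA_gt_tag]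
            rw [ih.2 r hlen _ [] (by simp), List.nil_append]
            simp
          · rw [pvTagSplit_other hg hc]
            simp only [List.foldl_cons, pvStepA_other_tag toks cur hc hg]
            rw [ih.1 r hlen toks (cur ++ [c]) (by simp)]
            simp
    · -- word mode
      rintro (_ | ⟨c, r⟩) hlen toks cur hcur
      · rcases eq_or_ne cur [] with h | h
        · simp [h, pvFinishA, pvScan_nil]
        · have hpfx := pvScan_word_prefix cur [] h hcur rfl
          rw [List.append_nil] at hpfx
          simp [pvFinishA, hpfx, pvScan_nil, h]
      · simp only [List.length_cons, Nat.succ_le_succ_iff] at hlen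
        by_cases hc : c = '<'
        · subst hc
          simp only [List.foldl_cons, pvStepA_lt]
          rw [ih.1 r hlen _ ['<'] (by simp)]
          rcases eq_or_ne cur [] with h | h
          · subst h
            rw [List.nil_append, pvScan_tag]
            simp
          · rw [pv_flush toks h,
              pvScan_word_prefix cur ('<' :: r) h hcur
                (List.takeWhile_cons_of_neg (by simp [pvWordChar])),
              pvScan_tag]
            simp
        · by_cases hsp : PySem.Chars.isspace c = true
          · simp only [List.foldl_cons, pvStepA_space toks cur hc hsp]
            rw [ih.2 r hlen _ [] (by simp), List.nil_append]
            rcases eq_or_ne cur [] with h | h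
            · subst h
              rw [List.nil_append, pvScan_space hc hsp]
              simp
            · rw [pv_flush toks h,
                pvScan_word_prefix cur (c :: r) h hcur
                  (List.takeWhile_cons_of_neg (by simp [pvWordChar, hsp])),
                pvScan_space hc hsp]
              simp
          · have hsp' : PySem.Chars.isspace c = false := by
              cases h' : PySem.Chars.isspace c
              · rfl
              · exact absurd h' hsp
            have hw : pvWordChar c = true := by simp [pvWordChar, hc, hsp']
            simp only [List.foldl_cons, pvStepA_word toks cur hc hsp']
            rw [ih.2 r hlen toks (cur ++ [c])
              (by intro x hx
                  rcases List.mem_append.mp hx with h | h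
                  · exact hcur x h
                  · simp only [List.mem_singleton] at h; subst h; exact hw)]
            simp

-- ===== VERDICT (by name: the statement is the Claim_ definition above) =====
theorem tokenize_words_and_html_spec : Claim_equal_tokenize_words_and_html := by
  intro text _
  unfold Spec_tokenize_words_and_html tokenize_words_and_html tokenize_words_and_html_alt
  rw [(pv_main text.toList.length).2 text.toList le_rfl [] [] (by simp)]
  simp
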